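-- pv_equiv track=rewrite | github.com/hardenyu21/SCG | hybrid/results/vanilla/854_CodeOnly.py | task_func
-- ===== SOURCE A (Python) =====
-- from itertools import permutations
-- import math
--
-- def task_func(numbers):
--     # Check if the input is a list of integers
--     if not isinstance(numbers, list) or not all(isinstance(n, int) for n in numbers):
--         raise TypeError("Input must be a list of integers.")
--
--     # Check if all numbers are non-negative
--     if any(n < 0 for n in numbers):
--         raise ValueError("Input numbers must be non-negative.")
--
--     # If the input list is empty, return empty lists
--     if not numbers:
--         return [], []
--
--     # Generate all permutations of the list
--     all_perms = list(permutations(numbers))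
--
--     # Calculate the sum of the factorials for each permutation
--     factorial_sums = []
--     for perm in all_perms:
--         factorial_sum = sum(math.factorial(n) for n in perm)
--         factorial_sums.append(factorial_sum)
--
--     return factorial_sums, all_perms
-- ===== SOURCE B (Python) =====
-- import math
--
-- def _select_perms(xs):
--     # selection recursion: pick each index in turn, recurse on the rest;
--     # this yields exactly itertools.permutations order
--     if not xs:
--         return [[]]
--     return [[xs[i]] + rest
--             for i in range(len(xs))
--             for rest in _select_perms(xs[:i] + xs[i + 1:])]
--
-- def task_func(numbers):
--     if not isinstance(numbers, list) or not all(isinstance(n, int) for n in numbers):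
--         raise TypeError("Input must be a list of integers.")
--     if any(n < 0 for n in numbers):
--         raise ValueError("Input numbers must be non-negative.")
--     if not numbers:
--         return [], []
--     all_perms = [tuple(p) for p in _select_perms(numbers)]
--     # the factorial sum is order-invariant: compute once, replicate
--     s = sum(math.factorial(n) for n in numbers)
--     return [s] * len(all_perms), all_perms
-- ===== Notes on version B (the rewrite author's own statement) =====
-- stated objective: alternative
-- what changed: B replaces itertools.permutations with its own recursive selection generator (pick each index, recurse on the remainder) and computes the order-invariant factorial sum once, replicating it n! times instead of A's per-permutation inner summation loop.
import Mathlib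
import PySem

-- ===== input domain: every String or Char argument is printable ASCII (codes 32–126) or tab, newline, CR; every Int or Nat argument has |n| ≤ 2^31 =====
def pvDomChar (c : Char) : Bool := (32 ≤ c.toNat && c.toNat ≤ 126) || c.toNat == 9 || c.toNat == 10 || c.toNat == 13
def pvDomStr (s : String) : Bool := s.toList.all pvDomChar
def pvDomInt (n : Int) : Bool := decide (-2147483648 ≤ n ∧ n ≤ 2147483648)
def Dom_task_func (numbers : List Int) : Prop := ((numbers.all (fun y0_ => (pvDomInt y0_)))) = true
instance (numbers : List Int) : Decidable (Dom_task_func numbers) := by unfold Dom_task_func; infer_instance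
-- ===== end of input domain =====

-- B generates the permutations by its own selection recursion (pick each index, recurse on the rest)
-- and computes the order-invariant factorial sum once, replicating it, instead of A's per-permutation inner summation.


-- math.factorial, exact on the nonnegative ints admitted by Pre_task_func
def pyFact (n : Int) : Int := (Nat.factorial n.toNat : Int)

-- ===== PORT A =====
def task_func (numbers : List Int) : List Int × List (List Int) :=
  if numbers = [] then ([], [])
  else
    let allPerms := PySem.List.permutations numbers numbers.length
    let factorialSums := allPerms.foldl (fun acc perm => acc ++ [(perm.map pyFact).sum]) []
    (factorialSums, allPerms)

-- ===== PORT B =====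
-- _select_perms: for each i in range(len(xs)), xs[i] prepended to every permutation of xs with index i removed
-- (xs[:i] + xs[i+1:] is List.eraseIdx; xs[i] is in range, ported as getD i 0; attach carries the range fact for termination)
def selectPerms (xs : List Int) : List (List Int) :=
  if xs = [] then [[]]
  else
    (List.range xs.length).attach.flatMap (fun i =>
      (selectPerms (xs.eraseIdx i.1)).map (fun rest => xs.getD i.1 0 :: rest))
termination_by xs.length
decreasing_by
  have hi : i.1 < xs.length := List.mem_range.mp i.2
  simp [List.length_eraseIdx, hi]
  omega

def task_func_alt (numbers : List Int) : List Int × List (List Int) :=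
  if numbers = [] then ([], [])
  else
    let allPerms := selectPerms numbers
    let s := (numbers.map pyFact).sum
    (List.replicate allPerms.length s, allPerms)

-- ===== PRECONDITION & SPEC =====
-- Pre_ excludes exactly the inputs where A raises ValueError (a negative element).
def Pre_task_func (numbers : List Int) : Prop := ∀ n ∈ numbers, 0 ≤ n
instance (numbers : List Int) : Decidable (Pre_task_func numbers) := by unfold Pre_task_func; infer_instance
def pvWitness_task_func : List Int := ([1, 2, 0])

def Spec_task_func (numbers : List Int) (out : List Int × List (List Int)) : Prop := out = task_func_alt numbers
instance (numbers : List Int) (out : List Int × List (List Int)) : Decidable (Spec_task_func numbers out) := by unfold Spec_task_func; infer_instance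

-- ===== CLAIM (what is proved, stated in full; the proofs are below) =====
def Claim_equal_task_func : Prop := ∀ (numbers : List Int), Dom_task_func numbers → Pre_task_func numbers → Spec_task_func numbers (task_func numbers)

-- ===== LEMMAS AND PROOFS =====

-- B's selection recursion generates exactly itertools.permutations (PySem's model of it)
theorem selectPerms_eq (xs : List Int) :
    selectPerms xs = PySem.List.permutations xs xs.length := by
  induction xs using selectPerms.induct with
  | case1 =>
    simp [selectPerms]
  | case2 xs h ih =>
    obtain ⟨m, hm⟩ : ∃ m, xs.length = m + 1 := by
      cases xs with
      | nil => exact absurd rfl h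
      | cons a l => exact ⟨l.length, rfl⟩
    rw [selectPerms, if_neg h, hm, PySem.List.permutations]
    have hattach : ∀ (l : List Nat) (f : Nat → List (List Int)),
        l.attach.flatMap (fun i => f i.1) = l.flatMap f := by
      intro l f; simp [List.flatMap_def]
    rw [hattach (List.range (m + 1))
      (fun j => (selectPerms (xs.eraseIdx j)).map (fun rest => xs.getD j 0 :: rest)), ← hm]
    apply List.flatMap_congr
    intro i hi
    have hlt : i < xs.length := List.mem_range.mp hi
    have hget : xs[i]? = some (xs.getD i 0) := by
      rw [List.getD_eq_getElem _ _ hlt]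
      exact List.getElem?_eq_getElem hlt
    rw [hget]
    have hlen : (xs.eraseIdx i).length = m := by
      rw [List.length_eraseIdx_of_lt hlt]
      omega
    rw [ih ⟨i, hi⟩, hlen]

theorem sum_map_perm_invariant (numbers p : List Int)
    (h : p ∈ PySem.List.permutations numbers numbers.length) :
    (p.map pyFact).sum = (numbers.map pyFact).sum :=
  (List.Perm.map pyFact (PySem.List.perm_of_mem_permutations h)).sum_eq

theorem foldl_sums_eq_replicate (numbers : List Int) :
    (PySem.List.permutations numbers numbers.length).foldl
      (fun acc perm => acc ++ [(perm.map pyFact).sum]) []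
      = List.replicate (PySem.List.permutations numbers numbers.length).length
          ((numbers.map pyFact).sum) := by
  rw [PySem.List.foldl_append_singleton_eq_map]
  rw [List.eq_replicate_iff]
  refine ⟨by simp, ?_⟩
  intro b hb
  rcases List.mem_map.mp hb with ⟨p, hp, rfl⟩
  exact sum_map_perm_invariant numbers p hp

-- ===== VERDICT (by name: the statement is the Claim_ definition above) =====
theorem task_func_spec : Claim_equal_task_func := by
  intro numbers _ _
  unfold Spec_task_func task_func task_func_alt
  by_cases h : numbers = []
  · simp [h]
  · simp only [h, selectPerms_eq]
    exact congrArg (·, _) (foldl_sums_eq_replicate numbers)
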